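-- pv_equiv track=rewrite | github.com/RDUMAP2020/SyLogic__Test | PySybollic_Proffer.py | _get_full_command
-- ===== SOURCE A (Python) =====
-- from typing import (
--     Dict, Any, List, Optional, Tuple, Union, Callable, Set, Sequence
-- )
--
-- def _get_full_command(lines: List[str], start_idx: int) -> Tuple[str, int]:
--     cmd_lines, i, brace_level = [], start_idx, 0
--     while i < len(lines):
--         line = lines[i]
--         cmd_lines.append(line)
--         brace_level += line.count('{') - line.count('}')
--         if brace_level == 0: return "\n".join(cmd_lines), i + 1
--         i += 1
--     return "\n".join(cmd_lines), i
-- ===== SOURCE B (Python) =====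
-- from typing import List, Tuple
--
-- def _get_full_command(lines: List[str], start_idx: int) -> Tuple[str, int]:
--     rest = lines[start_idx:]
--     if not rest:
--         return "", start_idx
--     cums, total = [], 0
--     for line in rest:
--         total += line.count('{') - line.count('}')
--         cums.append(total)
--     k = next((j for j, c in enumerate(cums) if c == 0), None)
--     if k is None:
--         return "\n".join(rest), len(lines)
--     return "\n".join(rest[:k + 1]), start_idx + k + 1
-- ===== Notes on version B (the rewrite author's own statement) =====
-- stated objective: alternative
-- what changed: B replaces A's stateful while-loop over indices (with early return) by a slice-then-scan pipeline: take the slice lines[start_idx:], build the list of cumulative brace-delta sums, find the first index where the cumulative sum is zero, and join the corresponding prefix.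
-- intended difference: For -len(lines) <= start_idx < 0 whose suffix lines[start_idx:] never balances its braces, A's manual index wraps past -1 to 0 and re-reads lines from the beginning (returning e.g. ('{\n{', 1) on (['{'], -1)), while B treats start_idx as a plain slice start and returns ('{', 1) there; B's is the intended value since re-reading lines after a negative-index wraparound is an artefact of A's loop. — e.g. on _get_full_command(["{"], -1): A returns ("{\n{", 1), B returns ("{", 1)
import Mathlib
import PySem

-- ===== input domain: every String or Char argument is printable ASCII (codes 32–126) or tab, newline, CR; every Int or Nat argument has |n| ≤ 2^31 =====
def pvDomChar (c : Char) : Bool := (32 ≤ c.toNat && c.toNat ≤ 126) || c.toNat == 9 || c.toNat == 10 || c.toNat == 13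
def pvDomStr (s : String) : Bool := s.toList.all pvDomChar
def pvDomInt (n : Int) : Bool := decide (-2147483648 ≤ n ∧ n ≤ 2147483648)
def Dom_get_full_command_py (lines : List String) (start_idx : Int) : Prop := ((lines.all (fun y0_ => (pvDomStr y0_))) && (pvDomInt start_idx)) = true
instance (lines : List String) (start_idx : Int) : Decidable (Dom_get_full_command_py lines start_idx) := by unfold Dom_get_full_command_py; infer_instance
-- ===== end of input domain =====

-- B replaces A's stateful while-loop by a slice / cumulative-sums / first-zero pipeline (alternative
-- decomposition, same cost); on the negative-start wrap quirk of A the two differ (see D_ below).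

-- ===== PORT A =====
-- A's while loop: i, brace_level, cmd_lines are the loop state; pyGet? none = Python IndexError
-- (A raises there; those inputs are excluded by Pre_ below, the ("", i) value is never claimed).
def pvALoop (lines : List String) : Nat → Int → Int → List String → String × Int
  | 0, i, _lvl, acc => (PySem.Str.join "\n" acc, i)
  | fuel + 1, i, lvl, acc =>
    if i < (lines.length : Int) then
      match PySem.List.pyGet? lines i with
      | none => ("", i)
      | some line =>
        let acc' := acc ++ [line]
        let lvl' := lvl + (((PySem.Str.count line "{" : Nat) : Int) - ((PySem.Str.count line "}" : Nat) : Int))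
        if lvl' = 0 then (PySem.Str.join "\n" acc', i + 1)
        else pvALoop lines fuel (i + 1) lvl' acc'
    else (PySem.Str.join "\n" acc, i)

def get_full_command_py (lines : List String) (start_idx : Int) : String × Int :=
  pvALoop lines ((lines.length : Int) - start_idx).toNat start_idx 0 []

-- ===== PORT B =====
def get_full_command_py_alt (lines : List String) (start_idx : Int) : String × Int :=
  let rest := PySem.List.slice lines (some start_idx) none
  if rest = [] then ("", start_idx)
  else
    let cums := (rest.foldl (fun (p : List Int × Int) line =>
        let t := p.2 + (((PySem.Str.count line "{" : Nat) : Int) - ((PySem.Str.count line "}" : Nat) : Int))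
        (p.1 ++ [t], t)) ([], 0)).1
    match (PySem.List.enumerate cums 0).find? (fun jc => jc.2 == 0) with
    | none => (PySem.Str.join "\n" rest, (lines.length : Int))
    | some jc => (PySem.Str.join "\n" (PySem.List.slice rest none (some (jc.1 + 1))), start_idx + jc.1 + 1)

-- ===== PRECONDITION & SPEC =====
-- Pre_ excludes exactly the inputs where A raises IndexError: start_idx < -len(lines)
-- (the first access lines[i] is then out of range even for Python's negative indexing).
def Pre_get_full_command_py (lines : List String) (start_idx : Int) : Prop :=
  -(lines.length : Int) ≤ start_idx
instance (lines : List String) (start_idx : Int) : Decidable (Pre_get_full_command_py lines start_idx) := by unfold Pre_get_full_command_py; infer_instance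

def pvWitness_get_full_command_py : List String × Int := (["x"], 0)

-- For -len(lines) ≤ start_idx < 0 whose suffix lines[start_idx:] never balances its braces, A's index
-- wraps past -1 to 0 and re-reads lines from the start, while B slices and returns the suffix with
-- index len(lines); B's is the intended value — the wraparound re-read is an artefact of A's loop.
def D_get_full_command_py (lines : List String) (start_idx : Int) : Prop :=
  start_idx < 0 ∧ -(lines.length : Int) ≤ start_idx ∧
  ∀ k : Nat, k < (-start_idx).toNat →
    (((lines.drop (lines.length - (-start_idx).toNat)).take (k + 1)).map
      (fun line => (((PySem.Str.count line "{" : Nat) : Int) - ((PySem.Str.count line "}" : Nat) : Int)))).sum ≠ 0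
instance (lines : List String) (start_idx : Int) : Decidable (D_get_full_command_py lines start_idx) := by unfold D_get_full_command_py; infer_instance

def Spec_get_full_command_py (lines : List String) (start_idx : Int) (out : String × Int) : Prop := ¬ D_get_full_command_py lines start_idx → out = get_full_command_py_alt lines start_idx
instance (lines : List String) (start_idx : Int) (out : String × Int) : Decidable (Spec_get_full_command_py lines start_idx out) := by unfold Spec_get_full_command_py; infer_instance

def pvDiffWitness_get_full_command_py : List String × Int := (["{"], -1)
def pvDiffWitnessOut_get_full_command_py : (String × Int) × (String × Int) := (("{\n{", 1), ("{", 1))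

-- ===== CLAIM (what is proved, stated in full; the proofs are below) =====
def Claim_unchanged_get_full_command_py : Prop := ∀ (lines : List String) (start_idx : Int), Dom_get_full_command_py lines start_idx → Pre_get_full_command_py lines start_idx → Spec_get_full_command_py lines start_idx (get_full_command_py lines start_idx)
def Claim_changed_get_full_command_py : Prop := Dom_get_full_command_py (pvDiffWitness_get_full_command_py.1) (pvDiffWitness_get_full_command_py.2) ∧ Pre_get_full_command_py (pvDiffWitness_get_full_command_py.1) (pvDiffWitness_get_full_command_py.2) ∧ D_get_full_command_py (pvDiffWitness_get_full_command_py.1) (pvDiffWitness_get_full_command_py.2) ∧ get_full_command_py (pvDiffWitness_get_full_command_py.1) (pvDiffWitness_get_full_command_py.2) = pvDiffWitnessOut_get_full_command_py.1 ∧ get_full_command_py_alt (pvDiffWitness_get_full_command_py.1) (pvDiffWitness_get_full_command_py.2) = pvDiffWitnessOut_get_full_command_py.2 ∧ pvDiffWitnessOut_get_full_command_py.1 ≠ pvDiffWitnessOut_get_full_command_py.2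
def Claim_exact_get_full_command_py : Prop := ∀ (lines : List String) (start_idx : Int), Dom_get_full_command_py lines start_idx → Pre_get_full_command_py lines start_idx → D_get_full_command_py lines start_idx → get_full_command_py lines start_idx ≠ get_full_command_py_alt lines start_idx

-- ===== LEMMAS AND PROOFS =====

-- per-line brace delta (proof-side abbreviation)
def pvD (line : String) : Int :=
  ((PySem.Str.count line "{" : Nat) : Int) - ((PySem.Str.count line "}" : Nat) : Int)

-- pure scan over the list of lines actually visited (i is carried as data only)
def pvScan (rest : List String) (i lvl : Int) (acc : List String) : String × Int :=
  match rest with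
  | [] => (PySem.Str.join "\n" acc, i)
  | l :: ls =>
      if lvl + pvD l = 0 then (PySem.Str.join "\n" (acc ++ [l]), i + 1)
      else pvScan ls (i + 1) (lvl + pvD l) (acc ++ [l])

-- cumulative sums of the brace deltas, starting from lvl
def pvCums (lvl : Int) (rest : List String) : List Int :=
  match rest with
  | [] => []
  | l :: ls => (lvl + pvD l) :: pvCums (lvl + pvD l) ls

theorem pvALoop_nonneg (lines : List String) (fuel : Nat) (i : Int) (h0 : 0 ≤ i)
    (hf : (lines.length : Int) - i ≤ fuel) (lvl : Int) (acc : List String) :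
    pvALoop lines fuel i lvl acc = pvScan (lines.drop i.toNat) i lvl acc := by
  induction fuel generalizing i lvl acc with
  | zero =>
      have hd : lines.drop i.toNat = [] := List.drop_eq_nil_of_le (by omega)
      simp [pvALoop, pvScan, hd]
  | succ fuel ih =>
      rw [pvALoop]
      by_cases hlt : i < (lines.length : Int)
      · have hi : i.toNat < lines.length := by omega
        rw [if_pos hlt, PySem.List.pyGet?_of_nonneg lines h0, List.getElem?_eq_getElem hi]
        have hd : lines.drop i.toNat = lines[i.toNat] :: lines.drop (i.toNat + 1) :=
          List.drop_eq_getElem_cons hi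
        rw [hd, pvScan]
        have htn : (i + 1).toNat = i.toNat + 1 := by omega
        simp only [pvD]
        by_cases hz : lvl + (((PySem.Str.count lines[i.toNat] "{" : Nat) : Int)
            - ((PySem.Str.count lines[i.toNat] "}" : Nat) : Int)) = 0
        · simp only [if_pos hz]
        · simp only [if_neg hz]
          rw [ih (i + 1) (by omega) (by omega), htn]
      · have hd : lines.drop i.toNat = [] := List.drop_eq_nil_of_le (by omega)
        rw [if_neg hlt, hd, pvScan]

theorem pvALoop_neg (lines : List String) (k : Nat) (fuel : Nat) (hk0 : 0 < k) (hk : k ≤ lines.length)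
    (hf : lines.length + k ≤ fuel) (lvl : Int) (acc : List String) :
    pvALoop lines fuel (-(k : Int)) lvl acc
      = pvScan (lines.drop (lines.length - k) ++ lines) (-(k : Int)) lvl acc := by
  induction k generalizing fuel lvl acc with
  | zero => omega
  | succ k ih =>
      cases fuel with
      | zero => omega
      | succ f =>
          rw [pvALoop]
          have hlt : -((k + 1 : Nat) : Int) < (lines.length : Int) := by push_cast; omega
          rw [if_pos hlt, PySem.List.pyGet?_neg_natCast lines (k + 1) (by omega) hk]
          have hi : lines.length - (k + 1) < lines.length := by omega
          rw [List.getElem?_eq_getElem hi]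
          have hsub : lines.length - (k + 1) + 1 = lines.length - k := by omega
          have hd := List.drop_eq_getElem_cons hi
          rw [hsub] at hd
          rw [hd, List.cons_append, pvScan]
          simp only [pvD]
          have hi1 : -((k + 1 : Nat) : Int) + 1 = -(k : Int) := by push_cast; omega
          by_cases hz : lvl + (((PySem.Str.count lines[lines.length - (k + 1)] "{" : Nat) : Int)
              - ((PySem.Str.count lines[lines.length - (k + 1)] "}" : Nat) : Int)) = 0
          · simp only [if_pos hz]
          · simp only [if_neg hz]
            rw [hi1]
            by_cases hk' : k = 0
            · subst hk'
              simp only [Nat.cast_zero, neg_zero]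
              have hdrop : lines.drop (lines.length - 0) = [] := by
                simp [List.drop_eq_nil_of_le]
              rw [hdrop, List.nil_append]
              rw [pvALoop_nonneg lines f 0 le_rfl (by omega)]
              simp
            · exact ih f (by omega) (by omega) (by omega) _ _

theorem pvFoldl_cums (rest : List String) (acc : List Int) (t : Int) :
    (rest.foldl (fun (p : List Int × Int) line =>
        let t' := p.2 + (((PySem.Str.count line "{" : Nat) : Int) - ((PySem.Str.count line "}" : Nat) : Int))
        (p.1 ++ [t'], t')) (acc, t)).1 = acc ++ pvCums t rest := by
  induction rest generalizing acc t with
  | nil => simp [pvCums]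
  | cons l ls ih =>
      rw [List.foldl_cons]
      exact (ih (acc ++ [t + pvD l]) (t + pvD l)).trans (by simp [pvCums])

theorem pvCums_length (lvl : Int) (rest : List String) : (pvCums lvl rest).length = rest.length := by
  induction rest generalizing lvl with
  | nil => rfl
  | cons l ls ih => simp [pvCums, ih]

theorem pvCums_getElem? (rest : List String) (lvl : Int) (k : Nat) (hk : k < rest.length) :
    (pvCums lvl rest)[k]? = some (lvl + ((rest.take (k + 1)).map pvD).sum) := by
  induction rest generalizing lvl k with
  | nil => simp at hk
  | cons l ls ih =>
      cases k with
      | zero => simp [pvCums]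
      | succ k =>
          simp only [pvCums, List.getElem?_cons_succ, List.take_succ_cons, List.map_cons,
            List.sum_cons]
          rw [ih (lvl + pvD l) k (by simpa using hk)]
          congr 1
          ring

theorem pvScan_eq_find (rest : List String) (i lvl : Int) (acc : List String) (s : Int) :
    pvScan rest i lvl acc =
      match (PySem.List.enumerate (pvCums lvl rest) s).find? (fun jc => jc.2 == 0) with
      | none => (PySem.Str.join "\n" (acc ++ rest), i + rest.length)
      | some jc => (PySem.Str.join "\n" (acc ++ rest.take (jc.1 - s + 1).toNat), i + (jc.1 - s) + 1) := by
  induction rest generalizing i lvl acc s with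
  | nil => simp [pvScan, pvCums, PySem.List.enumerate_nil]
  | cons l ls ih =>
      rw [pvScan]
      simp only [pvCums, PySem.List.enumerate_cons]
      by_cases hz : lvl + pvD l = 0
      · rw [if_pos hz, List.find?_cons_of_pos (by simp [hz])]
        simp
      · rw [if_neg hz, List.find?_cons_of_neg (by simp [hz])]
        rw [ih (i + 1) (lvl + pvD l) (acc ++ [l]) (s + 1)]
        cases hfind : (PySem.List.enumerate (pvCums (lvl + pvD l) ls) (s + 1)).find?
            (fun jc => jc.2 == 0) with
        | none =>
            simp only [Prod.mk.injEq]
            exact ⟨by simp, by simp; ring⟩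
        | some jc =>
            have hmem := List.mem_of_find?_eq_some hfind
            obtain ⟨kk, hkk, hjc⟩ := (PySem.List.mem_enumerate_iff _ _ _).1 hmem
            have hjc1 : jc.1 = s + 1 + (kk : Int) := by rw [hjc]
            have h1 : (jc.1 - s + 1).toNat = (jc.1 - (s + 1) + 1).toNat + 1 := by omega
            simp only [h1, List.take_succ_cons, Prod.mk.injEq]
            exact ⟨by simp, by ring⟩

theorem pvScan_append_of_found (xs : List String) (ys : List String) (i lvl : Int) (acc : List String)
    (s : Int) (jc : Int × Int)
    (h : (PySem.List.enumerate (pvCums lvl xs) s).find? (fun jc => jc.2 == 0) = some jc) :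
    pvScan (xs ++ ys) i lvl acc = pvScan xs i lvl acc := by
  induction xs generalizing i lvl acc s jc with
  | nil => simp [pvCums, PySem.List.enumerate_nil] at h
  | cons l ls ih =>
      rw [List.cons_append, pvScan, pvScan]
      by_cases hz : lvl + pvD l = 0
      · rw [if_pos hz, if_pos hz]
      · rw [if_neg hz, if_neg hz]
        rw [pvCums, PySem.List.enumerate_cons, List.find?_cons_of_neg (by simp [hz])] at h
        exact ih _ _ _ _ _ h

theorem pvAlt_eq (lines : List String) (s : Int) :
    get_full_command_py_alt lines s =
      (if PySem.List.slice lines (some s) none = [] then (("" : String), s)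
       else
        match (PySem.List.enumerate (pvCums 0 (PySem.List.slice lines (some s) none)) 0).find?
            (fun jc => jc.2 == 0) with
        | none => (PySem.Str.join "\n" (PySem.List.slice lines (some s) none), (lines.length : Int))
        | some jc =>
            (PySem.Str.join "\n"
              (PySem.List.slice (PySem.List.slice lines (some s) none) none (some (jc.1 + 1))),
             s + jc.1 + 1)) := by
  simp only [get_full_command_py_alt]
  rw [pvFoldl_cums (PySem.List.slice lines (some s) none) [] 0]
  rw [List.nil_append]

-- ===== VERDICT (by name: the statement is the Claim_ definition above) =====
-- found-case comparison: a zero in the cumulative sums pins both results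
theorem pvFound (rest : List String) (s : Int) (jc : Int × Int)
    (hfind : (PySem.List.enumerate (pvCums 0 rest) 0).find? (fun jc => jc.2 == 0) = some jc) :
    pvScan rest s 0 [] =
      (PySem.Str.join "\n" (PySem.List.slice rest none (some (jc.1 + 1))), s + jc.1 + 1) := by
  have hmem := List.mem_of_find?_eq_some hfind
  obtain ⟨kk, hkk, hjc⟩ := (PySem.List.mem_enumerate_iff _ _ _).1 hmem
  have hjc1 : jc.1 = (kk : Int) := by rw [hjc]; simp
  rw [pvScan_eq_find rest s 0 [] 0, hfind,
    PySem.List.slice_to rest (b := jc.1 + 1) (by omega)]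
  simp only [Prod.mk.injEq]
  exact ⟨by simp, by ring⟩

theorem get_full_command_py_spec : Claim_unchanged_get_full_command_py := by
  intro lines s hdom hpre hnD
  show get_full_command_py lines s = get_full_command_py_alt lines s
  unfold get_full_command_py
  rw [pvAlt_eq]
  by_cases hs : 0 ≤ s
  · -- nonnegative start: A scans lines.drop s.toNat; B slices the same suffix
    rw [pvALoop_nonneg lines _ s hs (by omega) 0 []]
    rw [PySem.List.slice_from lines hs]
    by_cases hempty : lines.drop s.toNat = []
    · rw [if_pos hempty, hempty, pvScan]
      rfl
    · rw [if_neg hempty]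
      cases hfind : (PySem.List.enumerate (pvCums 0 (lines.drop s.toNat)) 0).find?
          (fun jc => jc.2 == 0) with
      | none =>
          rw [pvScan_eq_find (lines.drop s.toNat) s 0 [] 0, hfind]
          simp only [Prod.mk.injEq]
          refine ⟨by simp, ?_⟩
          have hlt : s.toNat < lines.length := by
            by_contra hge
            exact hempty (List.drop_eq_nil_of_le (by omega))
          rw [List.length_drop]
          omega
      | some jc => exact pvFound _ s jc hfind
  · -- negative start inside Pre_: A wraps; ¬D_ provides a zero inside the suffix, so A
    -- returns before re-reading lines and agrees with B's slice
    have hs0 : s < 0 := by omega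
    have hkpos : 0 < (-s).toNat := by omega
    have hkle : (-s).toNat ≤ lines.length := by
      have := hpre
      unfold Pre_get_full_command_py at this
      omega
    have hseq : s = -(((-s).toNat : Int)) := by omega
    -- extract the zero from ¬D_
    have hex : ∃ kk : Nat, kk < (-s).toNat ∧
        (((lines.drop (lines.length - (-s).toNat)).take (kk + 1)).map pvD).sum = 0 := by
      by_contra hno
      push Not at hno
      exact hnD ⟨hs0, hpre, fun k hk => hno k hk⟩
    obtain ⟨kk, hkklt, hkksum⟩ := hex
    set rest := lines.drop (lines.length - (-s).toNat) with hrestdef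
    have hrestlen : rest.length = (-s).toNat := by
      rw [hrestdef, List.length_drop]
      omega
    -- the kk-th cumulative sum is zero, so find? succeeds
    have hcum : (pvCums 0 rest)[kk]? = some 0 := by
      rw [pvCums_getElem? rest 0 kk (by omega)]
      rw [hkksum]
      simp
    have hcmem : ((kk : Int), (0 : Int)) ∈ PySem.List.enumerate (pvCums 0 rest) 0 := by
      rw [PySem.List.mem_enumerate_iff]
      refine ⟨kk, by rw [pvCums_length]; omega, ?_⟩
      have := hcum
      rw [List.getElem?_eq_getElem (by rw [pvCums_length]; omega)] at this
      simp only [Option.some.injEq] at this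
      simp [this]
    cases hfind : (PySem.List.enumerate (pvCums 0 rest) 0).find? (fun jc => jc.2 == 0) with
    | none =>
        exact absurd (by simp : ((fun jc : Int × Int => jc.2 == 0) ((kk : Int), (0 : Int))) = true)
          (by simpa using List.find?_eq_none.mp hfind _ hcmem)
    | some jc =>
        -- A side: wrap lemma, then cut the appended tail using the found zero
        rw [hseq, pvALoop_neg lines (-s).toNat _ hkpos hkle (by omega) 0 []]
        rw [pvScan_append_of_found rest lines (-(((-s).toNat : Int))) 0 [] 0 jc hfind]
        -- B side: the slice is exactly rest
        have hslice : PySem.List.slice lines (some (-(((-s).toNat : Int)))) none = rest := by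
          rw [PySem.List.slice_some_none, PySem.List.clampIdx_neg_natCast _ _ hkpos]
        rw [hslice]
        have hne : rest ≠ [] := by
          intro h
          rw [h] at hrestlen
          simp at hrestlen
          omega
        rw [if_neg hne, hfind]
        exact pvFound rest _ jc hfind

theorem pvChars_join_lt (sep : List Char) (hsep : sep ≠ []) (x : List Char)
    (xs zs : List (List Char)) (hz : zs ≠ []) :
    (PySem.Chars.join sep (x :: xs)).length < (PySem.Chars.join sep ((x :: xs) ++ zs)).length := by
  induction xs generalizing x with
  | nil =>
      cases zs with
      | nil => exact absurd rfl hz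
      | cons z zs' =>
          rw [PySem.Chars.join_singleton, List.cons_append, List.nil_append,
            PySem.Chars.join_cons_cons]
          have hs : 0 < sep.length := List.length_pos_iff.mpr hsep
          simp only [List.length_append]
          omega
  | cons y xs' ih =>
      have hx : PySem.Chars.join sep ((x :: y :: xs') ++ zs)
          = x ++ sep ++ PySem.Chars.join sep ((y :: xs') ++ zs) := by
        rw [List.cons_append, List.cons_append, PySem.Chars.join_cons_cons]
      rw [PySem.Chars.join_cons_cons, hx]
      have h' := ih y
      simp only [List.length_append] at h' ⊢
      omega

theorem pvJoin_ne (rest zs : List String) (hr : rest ≠ []) (hz : zs ≠ []) :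
    PySem.Str.join "\n" (rest ++ zs) ≠ PySem.Str.join "\n" rest := by
  intro heq
  have htl : (PySem.Str.join "\n" (rest ++ zs)).toList = (PySem.Str.join "\n" rest).toList := by
    rw [heq]
  simp only [PySem.Str.join, String.toList_ofList] at htl
  cases rest with
  | nil => exact hr rfl
  | cons r rest' =>
      have hzs : zs.map String.toList ≠ [] := by simp [hz]
      have hlt := pvChars_join_lt "\n".toList (by decide) r.toList (rest'.map String.toList)
        (zs.map String.toList) hzs
      rw [List.map_append, List.map_cons] at htl
      rw [htl] at hlt
      omega

theorem get_full_command_py_tight : Claim_exact_get_full_command_py := by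
  intro lines s hdom hpre hD heq
  obtain ⟨hs0, hple, hnz⟩ := hD
  have hkpos : 0 < (-s).toNat := by omega
  have hkle : (-s).toNat ≤ lines.length := by
    unfold Pre_get_full_command_py at hpre
    omega
  have hlen0 : 0 < lines.length := by omega
  have hlne : lines ≠ [] := by
    intro h; rw [h] at hlen0; simp at hlen0
  have hseq : s = -(((-s).toNat : Int)) := by omega
  set k := (-s).toNat with hkdef
  set rest := lines.drop (lines.length - k) with hrestdef
  have hrestlen : rest.length = k := by
    rw [hrestdef, List.length_drop]; omega
  have hrne : rest ≠ [] := by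
    intro h; rw [h] at hrestlen; simp at hrestlen; omega
  -- all cumulative sums over rest are nonzero
  have hnz' : ∀ kk : Nat, kk < k → ((rest.take (kk + 1)).map pvD).sum ≠ 0 := fun kk hk => hnz kk hk
  -- B returns (join rest, lines.length)
  have hfindnone : (PySem.List.enumerate (pvCums 0 rest) 0).find? (fun jc => jc.2 == 0) = none := by
    rw [List.find?_eq_none]
    intro x hx
    obtain ⟨kk, hkk, hxeq⟩ := (PySem.List.mem_enumerate_iff _ _ _).1 hx
    rw [pvCums_length] at hkk
    have hval := pvCums_getElem? rest 0 kk (by omega)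
    rw [List.getElem?_eq_getElem (by rw [pvCums_length]; omega)] at hval
    simp only [Option.some.injEq] at hval
    rw [hxeq]
    simp only [beq_iff_eq]
    rw [hval]
    have := hnz' kk (by omega)
    omega
  have hslice : PySem.List.slice lines (some s) none = rest := by
    rw [hseq, PySem.List.slice_some_none, PySem.List.clampIdx_neg_natCast _ _ hkpos]
  have hB : get_full_command_py_alt lines s
      = (PySem.Str.join "\n" rest, (lines.length : Int)) := by
    rw [pvAlt_eq, hslice, if_neg hrne, hfindnone]
  -- A scans rest ++ lines
  have hA : get_full_command_py lines s = pvScan (rest ++ lines) s 0 [] := by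
    unfold get_full_command_py
    rw [hseq, pvALoop_neg lines k _ hkpos hkle (by omega) 0 []]
  rw [hA, hB] at heq
  rw [pvScan_eq_find (rest ++ lines) s 0 [] 0] at heq
  cases hfind : (PySem.List.enumerate (pvCums 0 (rest ++ lines)) 0).find?
      (fun jc => jc.2 == 0) with
  | none =>
      rw [hfind] at heq
      have h1 := congrArg Prod.fst heq
      simp only [List.nil_append] at h1
      exact pvJoin_ne rest lines hrne hlne h1
  | some jc =>
      rw [hfind] at heq
      have hpred := List.find?_some hfind
      simp only [beq_iff_eq] at hpred
      have hmem := List.mem_of_find?_eq_some hfind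
      obtain ⟨kk, hkk, hjc⟩ := (PySem.List.mem_enumerate_iff _ _ _).1 hmem
      rw [pvCums_length, List.length_append] at hkk
      have hjc1 : jc.1 = (kk : Int) := by rw [hjc]; simp
      have hjc2 : jc.2 = (pvCums 0 (rest ++ lines))[kk]'(by rw [pvCums_length, List.length_append]; omega) := by
        rw [hjc]
      -- kk cannot lie inside rest: those sums are nonzero
      have hkge : k ≤ kk := by
        by_contra hklt
        have hval := pvCums_getElem? (rest ++ lines) 0 kk (by rw [List.length_append]; omega)
        rw [List.getElem?_eq_getElem (by rw [pvCums_length, List.length_append]; omega)] at hval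
        simp only [Option.some.injEq] at hval
        have htake : (rest ++ lines).take (kk + 1) = rest.take (kk + 1) := by
          rw [List.take_append]
          have : kk + 1 - rest.length = 0 := by omega
          rw [this]
          simp
        rw [htake] at hval
        have := hnz' kk (by omega)
        rw [← hjc2] at hval
        omega
      -- A's first component is join (rest ++ nonempty prefix of lines)
      have h1 := congrArg Prod.fst heq
      simp only [List.nil_append] at h1
      have htn : (jc.1 - 0 + 1).toNat = kk + 1 := by omega
      rw [htn] at h1
      have htake : (rest ++ lines).take (kk + 1) = rest ++ lines.take (kk + 1 - k) := by
        rw [List.take_append, List.take_of_length_le (by omega), hrestlen]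
      rw [htake] at h1
      have hne2 : lines.take (kk + 1 - k) ≠ [] := by
        intro h
        have hl := congrArg List.length h
        rw [List.length_take] at hl
        simp only [List.length_nil] at hl
        omega
      exact pvJoin_ne rest (lines.take (kk + 1 - k)) hrne hne2 h1

theorem get_full_command_py_changed : Claim_changed_get_full_command_py := by
  unfold Claim_changed_get_full_command_py; decide
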